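-- pv_equiv track=rewrite | github.com/inoue021231/icpc-lecture | week4/1634_test.py | find_min_common_element
-- ===== SOURCE A (Python) =====
-- def find_min_common_element(matrix):
--     if not matrix:
--         return -1
--
--     common_elements = set(matrix[0])
--
--     for row in matrix[1:]:
--         common_elements.intersection_update(row)
--
--     if not common_elements:
--         return -1
--
--     return min(common_elements)
-- ===== SOURCE B (Python) =====
-- def find_min_common_element(matrix):
--     n = len(matrix)
--     counts = {}
--     for row in matrix:
--         for v in set(row):
--             counts[v] = counts.get(v, 0) + 1
--     common = [v for v, c in counts.items() if c == n]
--     return min(common) if common else -1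
-- ===== Notes on version B (the rewrite author's own statement) =====
-- stated objective: alternative
-- what changed: Replaces iterated set-intersection with a single counting pass (a dict mapping each value to the number of rows whose set contains it) followed by a filter for values present in all rows, taking their minimum.
import Mathlib
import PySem

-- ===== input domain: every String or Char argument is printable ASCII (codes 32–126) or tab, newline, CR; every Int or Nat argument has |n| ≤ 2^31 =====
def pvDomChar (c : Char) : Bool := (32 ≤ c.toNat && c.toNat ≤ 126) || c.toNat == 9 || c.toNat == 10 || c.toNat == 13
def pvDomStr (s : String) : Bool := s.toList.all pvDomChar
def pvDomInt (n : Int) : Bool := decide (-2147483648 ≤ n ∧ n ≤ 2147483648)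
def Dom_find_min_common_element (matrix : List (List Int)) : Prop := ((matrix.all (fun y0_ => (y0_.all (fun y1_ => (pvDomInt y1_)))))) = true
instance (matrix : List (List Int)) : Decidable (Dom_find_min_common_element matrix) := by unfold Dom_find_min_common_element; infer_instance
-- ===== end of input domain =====

-- B replaces iterated set-intersection with one counting pass over the rows plus a filter; alternative structure, same cost.


-- ===== PORT A =====
def find_min_common_element (matrix : List (List Int)) : Int :=
  match matrix with
  | [] => -1
  | r0 :: rest =>
    let common := rest.foldl (fun s row => PySem.Set.inter s row) (PySem.Set.ofList r0)
    if common = [] then -1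
    else
      match PySem.List.min? common (fun x => x) with
      | some m => m
      | none => -1

-- ===== PORT B =====
def find_min_common_element_alt (matrix : List (List Int)) : Int :=
  let n : Int := PySem.List.len matrix
  let counts : PySem.Dict Int Int := matrix.foldl
    (fun d row => (PySem.Set.ofList row).foldl (fun d v => d.insert v (d.getD v 0 + 1)) d)
    PySem.Dict.empty
  let common := (counts.items.filter (fun p => p.2 == n)).map (fun p => p.1)
  match PySem.List.min? common (fun x => x) with
  | some m => m
  | none => -1

-- ===== PRECONDITION & SPEC =====
def Spec_find_min_common_element (matrix : List (List Int)) (out : Int) : Prop := out = find_min_common_element_alt matrix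
instance (matrix : List (List Int)) (out : Int) : Decidable (Spec_find_min_common_element matrix out) := by unfold Spec_find_min_common_element; infer_instance

-- ===== CLAIM (what is proved, stated in full; the proofs are below) =====
def Claim_equal_find_min_common_element : Prop := ∀ (matrix : List (List Int)), Dom_find_min_common_element matrix → Spec_find_min_common_element matrix (find_min_common_element matrix)

-- ===== LEMMAS AND PROOFS =====

-- A's loop: membership in the iterated intersection
theorem mem_foldl_inter (rest : List (List Int)) (s : PySem.Set Int) (v : Int) :
    v ∈ rest.foldl (fun s row => PySem.Set.inter s row) s ↔ v ∈ s ∧ ∀ row ∈ rest, v ∈ row := by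
  induction rest generalizing s with
  | nil => simp
  | cons r t ih =>
    simp only [List.foldl_cons, ih, PySem.Set.mem_inter, List.forall_mem_cons]
    exact and_assoc

-- B's nested counting loop is the Counter of the concatenation of the deduped rows
theorem counts_eq_counter (matrix : List (List Int)) :
    matrix.foldl
      (fun d row => (PySem.Set.ofList row).foldl (fun d v => d.insert v (d.getD v 0 + 1)) d)
      PySem.Dict.empty
    = PySem.Dict.counter (matrix.flatMap (fun row => PySem.Set.ofList row)) := by
  rw [← PySem.Dict.foldl_insert_getD_add_one_eq_counter, List.foldl_flatMap]

-- counting v across the deduped rows counts the rows containing v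
theorem count_flatMap_ofList (matrix : List (List Int)) (v : Int) :
    (matrix.flatMap (fun row => PySem.Set.ofList row)).count v
      = matrix.countP (fun row => decide (v ∈ row)) := by
  induction matrix with
  | nil => simp
  | cons r t ih =>
    simp only [List.flatMap_cons, List.count_append, ih, List.countP_cons]
    by_cases h : v ∈ r
    · rw [List.count_eq_one_of_mem (PySem.Set.nodup_ofList r) (by simpa [PySem.Set.mem_ofList] using h)]
      simp [h, Nat.add_comm]
    · rw [List.count_eq_zero_of_not_mem (by simpa [PySem.Set.mem_ofList] using h)]
      simp [h]

-- min over two lists with the same elements (no key) agrees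
theorem min?_id_congr (xs ys : List Int) (h : ∀ v, v ∈ xs ↔ v ∈ ys) :
    PySem.List.min? xs (fun x => x) = PySem.List.min? ys (fun x => x) := by
  cases hx : PySem.List.min? xs (fun x => x) with
  | none =>
    rw [PySem.List.min?_eq_none_iff] at hx
    cases hy : PySem.List.min? ys (fun x => x) with
    | none => rfl
    | some m =>
      have := PySem.List.min?_mem hy
      rw [← h] at this
      simp [hx] at this
  | some m =>
    cases hy : PySem.List.min? ys (fun x => x) with
    | none =>
      rw [PySem.List.min?_eq_none_iff] at hy
      have := PySem.List.min?_mem hx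
      rw [h] at this
      simp [hy] at this
    | some m' =>
      have h1 := PySem.List.min?_isMin hx m' ((h m').mpr (PySem.List.min?_mem hy))
      have h2 := PySem.List.min?_isMin hy m ((h m).mp (PySem.List.min?_mem hx))
      exact congrArg some (le_antisymm h1 h2)

-- membership in B's 'common' list, for a nonempty matrix
theorem mem_common_iff (r0 : List Int) (rest : List (List Int)) (v : Int) :
    v ∈ ((((r0 :: rest).foldl
          (fun d row => (PySem.Set.ofList row).foldl (fun d v => d.insert v (d.getD v 0 + 1)) d)
          PySem.Dict.empty).items.filter
            (fun p => p.2 == PySem.List.len (r0 :: rest))).map (fun p => p.1))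
      ↔ v ∈ r0 ∧ ∀ row ∈ rest, v ∈ row := by
  rw [counts_eq_counter, PySem.Dict.items_counter]
  constructor
  · intro hv
    simp only [List.mem_map, List.mem_filter] at hv
    obtain ⟨p, ⟨hp, hfil⟩, hfst⟩ := hv
    obtain ⟨k, hkS, hk⟩ := hp
    subst hk
    simp only at hfst
    subst hfst
    simp only [beq_iff_eq, PySem.List.len_eq] at hfil
    have hcnt2 : ((r0 :: rest).flatMap (fun row => PySem.Set.ofList row)).count k
        = (r0 :: rest).length := by exact_mod_cast hfil
    rw [count_flatMap_ofList] at hcnt2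
    have hall := List.countP_eq_length.mp hcnt2
    refine ⟨by simpa using hall r0 (List.mem_cons_self ..), ?_⟩
    intro row hm
    simpa using hall row (List.mem_cons_of_mem _ hm)
  · rintro ⟨h0, hall⟩
    have hcnt : ((r0 :: rest).flatMap (fun row => PySem.Set.ofList row)).count v
        = (r0 :: rest).length := by
      rw [count_flatMap_ofList]
      refine List.countP_eq_length.mpr ?_
      intro row hm
      rcases List.mem_cons.mp hm with rfl | hm'
      · simpa using h0
      · simpa using hall row hm'
    refine List.mem_map.mpr
      ⟨(v, (((r0 :: rest).flatMap (fun row => PySem.Set.ofList row)).count v : Int)),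
       List.mem_filter.mpr ⟨List.mem_map.mpr ⟨v, ?_, rfl⟩, ?_⟩, rfl⟩
    · rw [PySem.Set.mem_ofList]
      exact List.mem_flatMap.mpr ⟨r0, List.mem_cons_self .., by simpa [PySem.Set.mem_ofList] using h0⟩
    · simp only [beq_iff_eq, PySem.List.len_eq, hcnt]

-- ===== VERDICT (by name: the statement is the Claim_ definition above) =====
theorem find_min_common_element_spec : Claim_equal_find_min_common_element := by
  intro matrix _
  unfold Spec_find_min_common_element find_min_common_element find_min_common_element_alt
  match matrix with
  | [] => rfl
  | r0 :: rest =>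
    simp only
    set commonA := rest.foldl (fun s row => PySem.Set.inter s row) (PySem.Set.ofList r0) with hA
    set commonB := ((((r0 :: rest).foldl
          (fun d row => (PySem.Set.ofList row).foldl (fun d v => d.insert v (d.getD v 0 + 1)) d)
          PySem.Dict.empty).items.filter
            (fun p => p.2 == PySem.List.len (r0 :: rest))).map (fun p => p.1)) with hB
    have hmem : ∀ v, v ∈ commonA ↔ v ∈ commonB := by
      intro v
      rw [hA, hB, mem_foldl_inter, mem_common_iff, PySem.Set.mem_ofList]
    have hmin : PySem.List.min? commonA (fun x => x) = PySem.List.min? commonB (fun x => x) :=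
      min?_id_congr _ _ hmem
    by_cases hemp : commonA = []
    · have : commonB = [] := by
        rw [List.eq_nil_iff_forall_not_mem]
        intro v hv
        exact (List.eq_nil_iff_forall_not_mem.mp hemp) v ((hmem v).mpr hv)
      simp [hemp, this, PySem.List.min?]
    · rw [if_neg hemp, ← hmin]
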